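-- pv_equiv track=rewrite | github.com/christinelee06/lfdvm | intersection.py | match_clusters
-- ===== SOURCE A (Python) =====
-- def match_clusters(map1, map2):
--     matches = {}
--     for cid1, files1 in map1.items():
--         best_cid = None
--         best_overlap = 0
--         for cid2, files2 in map2.items():
--             overlap = len(files1 & files2)
--             if overlap > best_overlap:
--                 best_overlap = overlap
--                 best_cid = cid2
--         if best_cid is not None:
--             matches[cid1] = best_cid
--     return matches
-- ===== SOURCE B (Python) =====
-- def match_clusters(map1, map2):
--     # Build an inverted file -> [cluster ids] index over map2, then tally
--     # overlaps per map1 cluster and pick the first strict maximum in map2 order.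
--     pairs = [(f, cid2) for cid2, files2 in map2.items() for f in files2]
--     index = {}
--     for f, cid2 in pairs:
--         index.setdefault(f, []).append(cid2)
--     matches = {}
--     for cid1, files1 in map1.items():
--         counts = {}
--         for f in files1:
--             for cid2 in index.get(f, ()):
--                 counts[cid2] = counts.get(cid2, 0) + 1
--         best_cid = None
--         best = 0
--         for cid2 in map2:
--             c = counts.get(cid2, 0)
--             if c > best:
--                 best = c
--                 best_cid = cid2
--         if best_cid is not None:
--             matches[cid1] = best_cid
--     return matches
-- ===== Notes on version B (the rewrite author's own statement) =====
-- stated objective: faster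
-- what changed: Instead of intersecting every map1 file set with every map2 file set, B builds an inverted file-to-cluster index over map2 once and tallies per-cluster overlap counts for each map1 cluster, then rescans map2 order to keep the first-strict-maximum tie-break.
import Mathlib
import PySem

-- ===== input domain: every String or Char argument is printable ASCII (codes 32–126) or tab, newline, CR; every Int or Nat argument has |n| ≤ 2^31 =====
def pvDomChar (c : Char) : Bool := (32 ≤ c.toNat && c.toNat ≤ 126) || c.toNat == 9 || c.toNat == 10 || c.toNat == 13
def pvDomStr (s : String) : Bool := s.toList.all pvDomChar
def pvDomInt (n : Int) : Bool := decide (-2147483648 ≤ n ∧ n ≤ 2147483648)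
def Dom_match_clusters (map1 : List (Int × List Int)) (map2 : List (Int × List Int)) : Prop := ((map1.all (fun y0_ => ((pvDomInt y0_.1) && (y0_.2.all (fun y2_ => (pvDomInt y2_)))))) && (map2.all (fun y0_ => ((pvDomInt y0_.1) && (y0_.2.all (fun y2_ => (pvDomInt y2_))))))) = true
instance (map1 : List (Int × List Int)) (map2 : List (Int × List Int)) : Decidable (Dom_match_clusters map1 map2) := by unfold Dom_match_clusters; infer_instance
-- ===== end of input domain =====

-- B replaces A's per-pair set intersections by an inverted file→cluster index with per-cluster
-- tallies (objective: faster; measured on large inputs); return-value equivalence only.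

-- ===== PORT A =====
def match_clusters (map1 : List (Int × List Int)) (map2 : List (Int × List Int)) : List (Int × Int) :=
  map1.foldl (fun ms p =>
    -- for cid2, files2 in map2.items(): track (best_cid, best_overlap)
    let r := map2.foldl (fun (st : Option Int × Int) q =>
        let overlap := PySem.Set.len (PySem.Set.inter p.2 q.2)   -- len(files1 & files2)
        if overlap > st.2 then (some q.1, overlap) else st)
      (none, 0)
    match r.1 with
    | some best => PySem.Dict.insert ms p.1 best
    | none => ms) (PySem.Dict.empty : PySem.Dict Int Int) |>.items

-- ===== PORT B =====
def match_clusters_alt (map1 : List (Int × List Int)) (map2 : List (Int × List Int)) : List (Int × Int) :=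
  -- pairs = [(f, cid2) for cid2, files2 in map2.items() for f in files2]
  let pairs := map2.flatMap (fun q => q.2.map (fun f => (f, q.1)))
  -- index.setdefault(f, []).append(cid2)
  let index : PySem.Dict Int (List Int) :=
    pairs.foldl (fun d p => d.modify p.1 [] (· ++ [p.2])) PySem.Dict.empty
  map1.foldl (fun ms p =>
    -- counts[cid2] = counts.get(cid2, 0) + 1 for each cid2 in index.get(f, ())
    let counts : PySem.Dict Int Int :=
      p.2.foldl (fun cs f => (index.getD f []).foldl (fun cs c2 => cs.modify c2 0 (· + 1)) cs)
        PySem.Dict.empty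
    -- for cid2 in map2: first strict maximum wins
    let r := map2.foldl (fun (st : Option Int × Int) q =>
        let c := counts.getD q.1 0
        if c > st.2 then (some q.1, c) else st)
      (none, 0)
    match r.1 with
    | some best => PySem.Dict.insert ms p.1 best
    | none => ms) (PySem.Dict.empty : PySem.Dict Int Int) |>.items

-- ===== PRECONDITION & SPEC =====
-- Pre_ says the association lists faithfully encode A's Python inputs of type dict[int, set[int]]:
-- map2's keys are distinct (a dict) and each map2 value has distinct elements (a set); lists
-- violating this correspond to no Python input at all.
def Pre_match_clusters (map1 : List (Int × List Int)) (map2 : List (Int × List Int)) : Prop :=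
  (map2.map Prod.fst).Nodup ∧ ∀ q ∈ map2, q.2.Nodup
instance (map1 : List (Int × List Int)) (map2 : List (Int × List Int)) : Decidable (Pre_match_clusters map1 map2) := by unfold Pre_match_clusters; infer_instance
def pvWitness_match_clusters : (List (Int × List Int)) × (List (Int × List Int)) :=
  ([(1, [10, 20]), (2, [30])], [(5, [20, 30]), (6, [10, 20])])
def Spec_match_clusters (map1 : List (Int × List Int)) (map2 : List (Int × List Int)) (out : List (Int × Int)) : Prop := out = match_clusters_alt map1 map2
instance (map1 : List (Int × List Int)) (map2 : List (Int × List Int)) (out : List (Int × Int)) : Decidable (Spec_match_clusters map1 map2 out) := by unfold Spec_match_clusters; infer_instance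

-- ===== CLAIM (what is proved, stated in full; the proofs are below) =====
def Claim_equal_match_clusters : Prop := ∀ (map1 : List (Int × List Int)) (map2 : List (Int × List Int)), Dom_match_clusters map1 map2 → Pre_match_clusters map1 map2 → Spec_match_clusters map1 map2 (match_clusters map1 map2)

-- ===== LEMMAS AND PROOFS =====

lemma pv_counts_spec (files1 : List Int) (idx : PySem.Dict Int (List Int))
    (cs : PySem.Dict Int Int) (c : Int) :
    (files1.foldl (fun cs f => (idx.getD f []).foldl (fun cs c2 => cs.modify c2 0 (· + 1)) cs)
        cs).getD c 0
      = cs.getD c 0 + (files1.map (fun f => (((idx.getD f []).count c : Int)))).sum := by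
  induction files1 generalizing cs with
  | nil => simp
  | cons f t ih =>
    simp only [List.foldl_cons, List.map_cons, List.sum_cons]
    rw [ih, PySem.Dict.getD_foldl_modify_add_one]
    ring

lemma pv_sum_if (files1 fs : List Int) :
    (files1.map (fun f => if f ∈ fs then (1 : Int) else 0)).sum
      = ((files1.filter (fun x => fs.contains x)).length : Int) := by
  induction files1 with
  | nil => simp
  | cons x t ih =>
    by_cases h : x ∈ fs <;> simp [h, ih] <;> push_cast <;> ring

lemma pv_count_pairs_zero (map2 : List (Int × List Int)) (f c : Int)
    (h : c ∉ map2.map Prod.fst) :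
    (((map2.flatMap (fun q => q.2.map (fun x => (x, q.1)))).filter
        (fun p => p.1 == f)).map (fun x => x.2)).count c = 0 := by
  induction map2 with
  | nil => simp
  | cons q t ih =>
    simp only [List.map_cons, List.mem_cons, not_or] at h
    simp only [List.flatMap_cons, List.filter_append, List.map_append, List.count_append]
    rw [ih h.2]
    have : c ∉ (((q.2.map (fun x => (x, q.1))).filter (fun p => p.1 == f)).map (fun x => x.2)) := by
      intro hc
      obtain ⟨x, hx, hxc⟩ := List.mem_map.mp hc
      obtain ⟨y, -, rfl⟩ := List.mem_map.mp (List.mem_filter.mp hx).1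
      exact h.1 (by simpa using hxc.symm)
    simp [List.count_eq_zero.mpr this]

lemma pv_head_count (fs : List Int) (c f : Int) :
    (((fs.map (fun x => (x, c))).filter (fun p => p.1 == f)).map (fun x => x.2)).count c
      = (fs.filter (fun x => x == f)).length := by
  induction fs with
  | nil => simp
  | cons y t ih =>
    by_cases h : y = f <;> simp [h, List.filter_cons, ih]

lemma pv_head_count_ne (fs : List Int) (c c' f : Int) (h : c' ≠ c) :
    (((fs.map (fun x => (x, c'))).filter (fun p => p.1 == f)).map (fun x => x.2)).count c = 0 := by
  induction fs with
  | nil => simp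
  | cons y t ih =>
    by_cases hy : y = f <;> simp [hy, List.filter_cons, ih, h]

lemma pv_count_pairs (map2 : List (Int × List Int))
    (hk : (map2.map Prod.fst).Nodup) (hv : ∀ q ∈ map2, q.2.Nodup)
    (c : Int) (fs : List Int) (hm : (c, fs) ∈ map2) (f : Int) :
    (((map2.flatMap (fun q => q.2.map (fun x => (x, q.1)))).filter
        (fun p => p.1 == f)).map (fun x => x.2)).count c = if f ∈ fs then 1 else 0 := by
  induction map2 with
  | nil => simp at hm
  | cons a t ih =>
    simp only [List.map_cons, List.nodup_cons] at hk
    simp only [List.flatMap_cons, List.filter_append, List.map_append, List.count_append]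
    rcases List.mem_cons.mp hm with heq | hmt
    · -- head is (c, fs)
      have ha1 : a.1 = c := by rw [← heq]
      have ha2 : a.2 = fs := by rw [← heq]
      rw [ha2, ha1, pv_head_count]
      have hz : c ∉ t.map Prod.fst := by rw [← ha1]; exact hk.1
      rw [pv_count_pairs_zero t f c hz]
      have hnd : fs.Nodup := ha2 ▸ hv a List.mem_cons_self
      have : (fs.filter (fun x => x == f)).length = fs.count f := by
        simp [List.count, List.countP_eq_length_filter]
      rw [this]
      by_cases hf : f ∈ fs
      · simp [hf, List.count_eq_one_of_mem hnd hf]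
      · simp [hf, List.count_eq_zero.mpr hf]
    · -- (c,fs) in tail
      have hc1 : a.1 ≠ c := by
        intro hcc
        exact hk.1 (hcc ▸ List.mem_map.mpr ⟨(c, fs), hmt, rfl⟩)
      rw [pv_head_count_ne a.2 c a.1 f hc1,
        ih hk.2 (fun q hq => hv q (List.mem_cons_of_mem a hq)) hmt]
      simp

lemma pv_inner (map2 : List (Int × List Int))
    (hk : (map2.map Prod.fst).Nodup) (hv : ∀ q ∈ map2, q.2.Nodup)
    (p2 : List Int) (q : Int × List Int) (hq : q ∈ map2) :
    ((p2.foldl (fun cs f =>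
        (((map2.flatMap (fun q => q.2.map (fun f => (f, q.1)))).foldl
            (fun d p => d.modify p.1 [] (· ++ [p.2])) PySem.Dict.empty).getD f []).foldl
          (fun cs c2 => cs.modify c2 0 (· + 1)) cs)
        (PySem.Dict.empty : PySem.Dict Int Int)).getD q.1 0)
      = PySem.Set.len (PySem.Set.inter p2 q.2) := by
  rw [pv_counts_spec]
  have hidx : ∀ f : Int,
      (((map2.flatMap (fun q => q.2.map (fun f => (f, q.1)))).foldl
          (fun d p => d.modify p.1 [] (· ++ [p.2])) PySem.Dict.empty).getD f [])
        = ((map2.flatMap (fun q => q.2.map (fun x => (x, q.1)))).filter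
            (fun p => p.1 == f)).map (fun x => x.2) := by
    intro f
    rw [PySem.Dict.getD_foldl_modify_append]
    simp [PySem.Dict.getD_empty]
  have hmap : (p2.map (fun f =>
      ((((map2.flatMap (fun q => q.2.map (fun f => (f, q.1)))).foldl
          (fun d p => d.modify p.1 [] (· ++ [p.2])) PySem.Dict.empty).getD f []).count q.1 : Int)))
      = p2.map (fun f => if f ∈ q.2 then (1 : Int) else 0) := by
    apply List.map_congr_left
    intro f _
    rw [hidx f, pv_count_pairs map2 hk hv q.1 q.2 (by simpa using hq) f]
    split <;> simp
  rw [hmap, pv_sum_if]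
  simp [PySem.Set.len, PySem.Set.inter, PySem.Dict.getD_empty]


-- ===== VERDICT (by name: the statement is the Claim_ definition above) =====
theorem match_clusters_spec : Claim_equal_match_clusters := by
  intro map1 map2 _ hpre
  obtain ⟨hk, hv⟩ := hpre
  unfold Spec_match_clusters match_clusters match_clusters_alt
  congr 1
  apply PySem.List.foldl_congr_mem
  intro acc p _
  simp only
  rw [PySem.List.foldl_congr_mem map2 _ _ ((none : Option Int), (0 : Int))
    (fun st q hq => by rw [← pv_inner map2 hk hv p.2 q hq])]
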